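-- pv_equiv track=rewrite | github.com/greenbone/hyperion | selene/schema/alerts/helper.py | append_alert_event_data
-- ===== SOURCE A (Python) =====
-- def append_data_value(data, key, value):
--     if value is not None:
--         data[key] = str(value)
--
-- def append_alert_event_data(event, event_data):
--     if not event or not event_data:
--         return None
--     data = dict()
--     for key, value in event_data.items():
--         if event == "Task run status changed":
--             if key == "status":
--                 append_data_value(data, key, value)
--         elif (
--             event == "Updated SecInfo arrived" or event == "New SecInfo arrived"
--         ):
--             if key == "secinfo_type":
--                 append_data_value(data, key, value)
--     return data if data != {} else None
-- ===== SOURCE B (Python) =====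
-- def append_alert_event_data(event, event_data):
--     if not event or not event_data:
--         return None
--     if event == "Task run status changed":
--         key = "status"
--     elif event in ("Updated SecInfo arrived", "New SecInfo arrived"):
--         key = "secinfo_type"
--     else:
--         return None
--     value = event_data.get(key)
--     if value is None:
--         return None
--     return {key: str(value)}
-- ===== Notes on version B (the rewrite author's own statement) =====
-- stated objective: simpler
-- what changed: Instead of scanning every item of event_data and conditionally inserting into an accumulator dict, B dispatches on the event string to the single relevant key and does one direct event_data.get(key) lookup, with no loop at all.
import Mathlib
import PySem

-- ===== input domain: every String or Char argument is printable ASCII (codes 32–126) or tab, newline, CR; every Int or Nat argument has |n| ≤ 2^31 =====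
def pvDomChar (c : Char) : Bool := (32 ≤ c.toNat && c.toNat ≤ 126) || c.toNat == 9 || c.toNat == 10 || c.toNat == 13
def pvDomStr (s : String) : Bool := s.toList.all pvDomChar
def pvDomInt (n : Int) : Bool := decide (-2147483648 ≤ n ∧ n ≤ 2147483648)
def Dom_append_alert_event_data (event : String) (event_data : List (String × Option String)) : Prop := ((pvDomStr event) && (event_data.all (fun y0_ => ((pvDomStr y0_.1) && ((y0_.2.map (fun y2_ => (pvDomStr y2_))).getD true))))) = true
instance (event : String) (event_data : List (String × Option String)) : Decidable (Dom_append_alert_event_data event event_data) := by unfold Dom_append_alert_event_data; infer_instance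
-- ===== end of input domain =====

-- B replaces A's scan over all items by a direct dispatch on the event string and one lookup (simpler; same behaviour).


-- ===== PORT A =====
-- append_data_value(data, key, value): value is typed Optional[str] here, so str(value) on a non-None value is the string itself
def append_data_value (data : PySem.Dict String String) (key : String) (value : Option String) : PySem.Dict String String :=
  match value with
  | some v => data.insert key v
  | none => data

def append_alert_event_data (event : String) (event_data : List (String × Option String)) : Option (List (String × String)) :=
  if event = "" ∨ event_data = [] then none
  else
    let data := event_data.foldl (fun data kv =>
      if event = "Task run status changed" then
        (if kv.1 = "status" then append_data_value data kv.1 kv.2 else data)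
      else if event = "Updated SecInfo arrived" ∨ event = "New SecInfo arrived" then
        (if kv.1 = "secinfo_type" then append_data_value data kv.1 kv.2 else data)
      else data) PySem.Dict.empty
    if data.items ≠ [] then some data.items else none

-- ===== PORT B =====
-- event_data.get(key): first matching stored value (the stored value may itself be None → none)
def dictGetFlat (l : List (String × Option String)) (k : String) : Option String :=
  match l with
  | [] => none
  | (k', v) :: rest => if k' = k then v else dictGetFlat rest k

def append_alert_event_data_alt (event : String) (event_data : List (String × Option String)) : Option (List (String × String)) :=
  if event = "" ∨ event_data = [] then none
  else
    match (if event = "Task run status changed" then some "status"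
           else if event = "Updated SecInfo arrived" ∨ event = "New SecInfo arrived" then some "secinfo_type"
           else none) with
    | none => none
    | some key =>
      match dictGetFlat event_data key with
      | some v => some [(key, v)]
      | none => none

-- ===== PRECONDITION & SPEC =====
-- Pre_ excludes association lists with duplicate keys: the Python argument is a dict, where duplicate
-- keys cannot arise, so the behaviour on such lists is an artefact of the list representation.
def Pre_append_alert_event_data (event : String) (event_data : List (String × Option String)) : Prop :=
  (event_data.map Prod.fst).Nodup
instance (event : String) (event_data : List (String × Option String)) : Decidable (Pre_append_alert_event_data event event_data) := by unfold Pre_append_alert_event_data; infer_instance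

def pvWitness_append_alert_event_data : String × (List (String × Option String)) :=
  ("Task run status changed", [("status", some "Done"), ("x", none)])

def Spec_append_alert_event_data (event : String) (event_data : List (String × Option String)) (out : Option (List (String × String))) : Prop := out = append_alert_event_data_alt event event_data
instance (event : String) (event_data : List (String × Option String)) (out : Option (List (String × String))) : Decidable (Spec_append_alert_event_data event event_data out) := by unfold Spec_append_alert_event_data; infer_instance

-- ===== CLAIM (what is proved, stated in full; the proofs are below) =====
def Claim_equal_append_alert_event_data : Prop := ∀ (event : String) (event_data : List (String × Option String)), Dom_append_alert_event_data event event_data → Pre_append_alert_event_data event event_data → Spec_append_alert_event_data event event_data (append_alert_event_data event event_data)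

-- ===== LEMMAS AND PROOFS =====

-- A's fold leaves the accumulator unchanged on a list containing no pair with key K
theorem foldA_not_mem (K : String) (l : List (String × Option String)) (d : PySem.Dict String String)
    (h : K ∉ l.map Prod.fst) :
    l.foldl (fun d kv => if kv.1 = K then append_data_value d kv.1 kv.2 else d) d = d := by
  induction l generalizing d with
  | nil => rfl
  | cons kv rest ih =>
    simp only [List.map_cons, List.mem_cons, not_or] at h
    have hne : ¬ kv.1 = K := fun hk => h.1 hk.symm
    rw [List.foldl_cons, if_neg hne]
    exact ih d h.2

-- A's fold over a nodup-keys list, started from the empty dict, produces exactly the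
-- singleton dict B builds from the first (= unique) match, or the empty dict
theorem foldA_items (K : String) (l : List (String × Option String))
    (hnd : (l.map Prod.fst).Nodup) :
    (l.foldl (fun d kv => if kv.1 = K then append_data_value d kv.1 kv.2 else d) PySem.Dict.empty).items
      = match dictGetFlat l K with
        | some v => [(K, v)]
        | none => [] := by
  induction l with
  | nil => rfl
  | cons kv rest ih =>
    obtain ⟨k, v⟩ := kv
    simp only [List.map_cons, List.nodup_cons] at hnd
    by_cases hk : k = K
    · subst hk
      rw [List.foldl_cons, dictGetFlat]
      simp only [if_true]
      cases v with
      | none =>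
        rw [show append_data_value PySem.Dict.empty k none = PySem.Dict.empty from rfl,
            foldA_not_mem k rest PySem.Dict.empty hnd.1]
        rfl
      | some v =>
        rw [show append_data_value PySem.Dict.empty k (some v) = PySem.Dict.empty.insert k v from rfl,
            foldA_not_mem k rest (PySem.Dict.empty.insert k v) hnd.1]
        rfl
    · rw [List.foldl_cons, dictGetFlat]
      simp only [if_neg hk]
      exact ih hnd.2

-- ===== VERDICT (by name: the statement is the Claim_ definition above) =====
theorem append_alert_event_data_spec : Claim_equal_append_alert_event_data := by
  intro event event_data _ hpre
  unfold Spec_append_alert_event_data append_alert_event_data append_alert_event_data_alt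
  by_cases hguard : event = "" ∨ event_data = []
  · simp [hguard]
  · simp only [if_neg hguard]
    by_cases h1 : event = "Task run status changed"
    · subst h1
      simp only [String.reduceEq, if_true, if_false, or_self]
      rw [foldA_items "status" event_data hpre]
      cases dictGetFlat event_data "status" <;> simp
    · by_cases h2 : event = "Updated SecInfo arrived" ∨ event = "New SecInfo arrived"
      · simp only [if_neg h1, if_pos h2]
        rw [foldA_items "secinfo_type" event_data hpre]
        cases dictGetFlat event_data "secinfo_type" <;> simp
      · simp only [if_neg h1, if_neg h2, List.foldl_fixed]
        rfl
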